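-- pv_equiv track=rewrite | github.com/twardoch/midjargon | src/midjargon/core/input.py | expand_permutations
-- ===== SOURCE A (Python) =====
-- def expand_permutations(prompt: str) -> list[str]:
--     """Expand permutations in a prompt.
--
--     Args:
--         prompt: Raw prompt string with permutations.
--
--     Returns:
--         List of expanded prompts.
--
--     Raises:
--         ValueError: If permutation syntax is invalid.
--     """
--     # Handle escaped braces and commas
--     prompt = prompt.replace("\\{", "\x00").replace("\\}", "\x01").replace("\\,", "\x02")
--
--     # Find all permutation groups
--     groups = []
--     start = 0
--     depth = 0
--     group_start = -1
--
--     for i, char in enumerate(prompt):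
--         if char == "{":
--             depth += 1
--             if depth == 1:
--                 group_start = i
--         elif char == "}":
--             depth -= 1
--             if depth == 0:
--                 groups.append((group_start, i))
--             elif depth < 0:
--                 msg = "Unmatched closing brace"
--                 raise ValueError(msg)
--
--     if depth > 0:
--         msg = "Unclosed permutation group"
--         raise ValueError(msg)
--
--     # No permutations found
--     if not groups:
--         return [prompt.replace("\x00", "{").replace("\x01", "}").replace("\x02", ",")]
--
--     # Process each group
--     result = [""]
--     pos = 0
--
--     for start, end in groups:
--         # Add text before group
--         prefix = (
--             prompt[pos:start]
--             .replace("\x00", "{")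
--             .replace("\x01", "}")
--             .replace("\x02", ",")
--         )
--         result = [r + prefix for r in result]
--
--         # Get group options
--         options = [
--             o.strip()
--             for o in prompt[start + 1 : end].split(",")
--             if o.strip() or o.strip() == ""
--         ]
--         if not options:
--             msg = "Empty permutation group"
--             raise ValueError(msg)
--
--         # Expand options
--         new_result = []
--         for r in result:
--             for opt in options:
--                 new_result.append(
--                     r
--                     + opt.replace("\x00", "{").replace("\x01", "}").replace("\x02", ",")
--                 )
--         result = new_result
--         pos = end + 1
--
--     # Add remaining text
--     if pos < len(prompt):
--         suffix = (
--             prompt[pos:].replace("\x00", "{").replace("\x01", "}").replace("\x02", ",")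
--         )
--         result = [r + suffix for r in result]
--
--     return result
-- ===== SOURCE B (Python) =====
-- def expand_permutations(prompt: str) -> list[str]:
--     """Parse-then-product re-implementation: one scanning pass splits the prompt
--     into literal chunks and per-group option lists, then a Cartesian product of
--     the option lists is interleaved with the literals."""
--     s = prompt.replace("\\{", "\x00").replace("\\}", "\x01").replace("\\,", "\x02")
--
--     def restore(t: str) -> str:
--         return t.replace("\x00", "{").replace("\x01", "}").replace("\x02", ",")
--
--     literals = []   # len(groups) + 1 literal chunks, already restored
--     groups = []     # per group: list of restored, stripped options
--     cur = []        # characters of the current literal chunk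
--     i = 0
--     n = len(s)
--     while i < n:
--         c = s[i]
--         if c == "{":
--             depth = 1
--             j = i + 1
--             buf = []
--             while j < n:
--                 cj = s[j]
--                 j += 1
--                 if cj == "{":
--                     depth += 1
--                     buf.append(cj)
--                 elif cj == "}":
--                     depth -= 1
--                     if depth == 0:
--                         break
--                     buf.append(cj)
--                 else:
--                     buf.append(cj)
--             if depth:
--                 msg = "Unclosed permutation group"
--                 raise ValueError(msg)
--             literals.append(restore("".join(cur)))
--             cur = []
--             groups.append([restore(o.strip()) for o in "".join(buf).split(",")])
--             i = j
--         elif c == "}":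
--             msg = "Unmatched closing brace"
--             raise ValueError(msg)
--         else:
--             cur.append(c)
--             i += 1
--     literals.append(restore("".join(cur)))
--
--     def combos(gs):
--         if not gs:
--             return [[]]
--         return [[o] + rest for o in gs[0] for rest in combos(gs[1:])]
--
--     out = []
--     for ts in combos(groups):
--         parts = [literals[0]]
--         for t, l in zip(ts, literals[1:]):
--             parts.append(t)
--             parts.append(l)
--         out.append("".join(parts))
--     return out
-- ===== Notes on version B (the rewrite author's own statement) =====
-- stated objective: alternative
-- what changed: B replaces A's two-phase index bookkeeping (an enumerate scan collecting (start,end) index pairs, then slicing the string and multiplying a growing result list group by group) with a single parse pass that splits the prompt into literal chunks and per-group option lists, followed by a recursive Cartesian product whose tuples are interleaved with the literal chunks.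
-- outside the precondition, e.g. on expand_permutations('}'): A raises ValueError, B raises ValueError; on expand_permutations('{'): A raises ValueError, B raises ValueError
import Mathlib
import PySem

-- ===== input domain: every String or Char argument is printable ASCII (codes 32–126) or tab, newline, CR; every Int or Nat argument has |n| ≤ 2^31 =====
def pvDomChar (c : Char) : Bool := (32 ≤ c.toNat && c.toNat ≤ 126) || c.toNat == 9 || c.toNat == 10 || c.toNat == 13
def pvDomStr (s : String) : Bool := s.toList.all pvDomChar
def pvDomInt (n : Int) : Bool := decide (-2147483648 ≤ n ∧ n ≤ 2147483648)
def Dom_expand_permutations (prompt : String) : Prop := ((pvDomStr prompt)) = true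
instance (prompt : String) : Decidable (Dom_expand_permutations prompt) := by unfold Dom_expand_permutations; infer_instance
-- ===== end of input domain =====

-- B re-implements A as parse-then-Cartesian-product (one parsing pass into literal
-- chunks and option lists, then product + interleaved join) instead of A's
-- index-pair scan with incremental result multiplication; objective: alternative/simpler.

-- ===== PORT A =====
-- shared by both ports (both Pythons perform the same three .replace chains)
def substA (s : List Char) : List Char :=
  PySem.Chars.replace (PySem.Chars.replace (PySem.Chars.replace s ['\\', '{'] [Char.ofNat 0]) ['\\', '}'] [Char.ofNat 1]) ['\\', ','] [Char.ofNat 2]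

def restoreA (s : List Char) : List Char :=
  PySem.Chars.replace (PySem.Chars.replace (PySem.Chars.replace s [Char.ofNat 0] ['{']) [Char.ofNat 1] ['}']) [Char.ofNat 2] [',']

-- the enumerate loop finding top-level groups; none = raise ValueError
def stepA (st : Option (List (Int × Int) × Int × Int)) (ic : Int × Char) :
    Option (List (Int × Int) × Int × Int) :=
  match st with
  | none => none
  | some (groups, depth, gstart) =>
    if ic.2 = '{' then
      some (groups, depth + 1, if depth + 1 = 1 then ic.1 else gstart)
    else if ic.2 = '}' then
      if depth - 1 = 0 then some (groups ++ [(gstart, ic.1)], depth - 1, gstart)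
      else if depth - 1 < 0 then none
      else some (groups, depth - 1, gstart)
    else some (groups, depth, gstart)

-- options of one group, with A's (vacuous) filter transliterated
def optionsA (cs : List Char) : List (List Char) :=
  ((PySem.Chars.splitOn cs [',']).map PySem.Chars.strip).filter
    (fun o => !o.isEmpty || o.isEmpty)

-- the 'for start, end in groups' loop; none = raise "Empty permutation group"
def stepA2 (t : List Char) (st : Option (List (List Char) × Int)) (g : Int × Int) :
    Option (List (List Char) × Int) :=
  match st with
  | none => none
  | some (result, pos) =>
    let pre := restoreA (PySem.List.slice t (some pos) (some g.1))
    let result := result.map (· ++ pre)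
    let opts := optionsA (PySem.List.slice t (some (g.1 + 1)) (some g.2))
    if opts = [] then none
    else some (result.flatMap (fun r => opts.map (fun o => r ++ restoreA o)), g.2 + 1)

def expand_permutations (prompt : String) : List String :=
  let t := substA prompt.toList
  match (PySem.List.enumerate t 0).foldl stepA (some ([], 0, -1)) with
  | none => []                      -- raise "Unmatched closing brace"
  | some (groups, depth, _) =>
    if 0 < depth then []            -- raise "Unclosed permutation group"
    else if groups = [] then [String.ofList (restoreA t)]
    else
      match groups.foldl (stepA2 t) (some ([[]], 0)) with
      | none => []                  -- raise "Empty permutation group" (unreachable)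
      | some (result, pos) =>
        (if pos < (t.length : Int) then
          result.map (· ++ restoreA (PySem.List.slice t (some pos) none))
        else result).map String.ofList

-- ===== PORT B =====
-- inner while loop: scan to the matching close brace, accumulating the content
def takeGroupB : List Char → Int → List Char → Option (List Char × List Char)
  | [], _, _ => none
  | c :: rest, depth, acc =>
    if c = '{' then takeGroupB rest (depth + 1) (acc ++ [c])
    else if c = '}' then
      if depth - 1 = 0 then some (acc, rest)
      else takeGroupB rest (depth - 1) (acc ++ [c])
    else takeGroupB rest depth (acc ++ [c])

theorem takeGroupB_rest_lt : ∀ (cs : List Char) (d : Int) (acc content rest : List Char),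
    takeGroupB cs d acc = some (content, rest) → rest.length < cs.length := by
  intro cs
  induction cs with
  | nil => intro d acc content rest h; simp [takeGroupB] at h
  | cons c cs ih =>
    intro d acc content rest h
    simp only [takeGroupB] at h
    split_ifs at h with h1 h2 h3
    · exact Nat.lt_succ_of_lt (ih _ _ _ _ h)
    · simp only [Option.some.injEq, Prod.mk.injEq] at h
      simp [← h.2]
    · exact Nat.lt_succ_of_lt (ih _ _ _ _ h)
    · exact Nat.lt_succ_of_lt (ih _ _ _ _ h)

-- outer while loop: split into literal chunks and option lists; none = ValueError
def parseB : List Char → List Char → Option (List (List Char) × List (List (List Char)))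
  | [], cur => some ([restoreA cur], [])
  | c :: rest, cur =>
    if c = '{' then
      match htk : takeGroupB rest 1 [] with
      | none => none                -- raise "Unclosed permutation group"
      | some (content, rest') =>
        match parseB rest' [] with
        | none => none
        | some (lits, grps) =>
          some (restoreA cur :: lits,
            ((PySem.Chars.splitOn content [',']).map
              (fun o => restoreA (PySem.Chars.strip o))) :: grps)
    else if c = '}' then none       -- raise "Unmatched closing brace"
    else parseB rest (cur ++ [c])
termination_by cs _ => cs.length
decreasing_by
  · exact Nat.lt_succ_of_lt (takeGroupB_rest_lt _ _ _ _ _ htk)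
  · simp

def combosB : List (List (List Char)) → List (List (List Char))
  | [] => [[]]
  | g :: gs => g.flatMap (fun o => (combosB gs).map (fun rest => o :: rest))

def joinB : List (List Char) → List (List Char) → List Char
  | [], _ => []
  | l :: _, [] => l
  | l :: ls, t :: ts => l ++ t ++ joinB ls ts

def expand_permutations_alt (prompt : String) : List String :=
  match parseB (substA prompt.toList) [] with
  | none => []
  | some (lits, grps) => (combosB grps).map (fun ts => String.ofList (joinB lits ts))

-- ===== PRECONDITION & SPEC =====
-- Pre_ excludes exactly the inputs on which A raises ValueError: prompts whose
-- escape-substituted text has a prefix with more '}' than '{' (unmatched closing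
-- brace) or unequal total brace counts (unclosed group).
def Pre_expand_permutations (prompt : String) : Prop :=
  (∀ k, k ≤ (substA prompt.toList).length →
      ((substA prompt.toList).take k).count '}' ≤ ((substA prompt.toList).take k).count '{') ∧
  (substA prompt.toList).count '{' = (substA prompt.toList).count '}'
instance (prompt : String) : Decidable (Pre_expand_permutations prompt) := by
  unfold Pre_expand_permutations; infer_instance
def pvWitness_expand_permutations : String := "a {b,c} d"

def Spec_expand_permutations (prompt : String) (out : List String) : Prop := out = expand_permutations_alt prompt
instance (prompt : String) (out : List String) : Decidable (Spec_expand_permutations prompt out) := by unfold Spec_expand_permutations; infer_instance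

-- ===== CLAIM (what is proved, stated in full; the proofs are below) =====
def Claim_equal_expand_permutations : Prop := ∀ (prompt : String), Dom_expand_permutations prompt → Pre_expand_permutations prompt → Spec_expand_permutations prompt (expand_permutations prompt)

-- ===== LEMMAS AND PROOFS =====

-- small library facts
theorem go_ne_nil (sep : List Char) (fuel : Nat) : ∀ (l cur : List Char) (acc : List (List Char)),
    PySem.Chars.splitOn.go sep fuel l cur acc ≠ [] := by
  induction fuel with
  | zero => intro l cur acc; simp [PySem.Chars.splitOn.go]
  | succ fuel ih =>
    intro l cur acc
    cases l with
    | nil => simp [PySem.Chars.splitOn.go]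
    | cons c rest =>
      simp only [PySem.Chars.splitOn.go]
      split_ifs with h
      · exact ih _ _ _
      · exact ih _ _ _

theorem splitOn_ne_nil (cs : List Char) : PySem.Chars.splitOn cs [','] ≠ [] :=
  go_ne_nil _ _ _ _ _

theorem restoreA_nil : restoreA [] = [] := by decide

theorem optionsA_eq (cs : List Char) :
    optionsA cs = (PySem.Chars.splitOn cs [',']).map PySem.Chars.strip := by
  simp [optionsA]

theorem optionsA_ne_nil (cs : List Char) : optionsA cs ≠ [] := by
  simp [optionsA_eq, splitOn_ne_nil cs]

-- takeGroupB: accumulator generalization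
theorem takeGroupB_acc : ∀ (cs : List Char) (d : Int) (acc : List Char),
    takeGroupB cs d acc = (takeGroupB cs d []).map (fun p => (acc ++ p.1, p.2)) := by
  intro cs
  induction cs with
  | nil => intro d acc; simp [takeGroupB]
  | cons c rest ih =>
    intro d acc
    simp only [takeGroupB]
    split_ifs with h1 h2 h3
    · rw [ih _ (acc ++ [c]), ih _ ([] ++ [c])]
      simp [Option.map_map, Function.comp_def]
    · simp
    · rw [ih _ (acc ++ [c]), ih _ ([] ++ [c])]
      simp [Option.map_map, Function.comp_def]
    · rw [ih _ (acc ++ [c]), ih _ ([] ++ [c])]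
      simp [Option.map_map, Function.comp_def]

-- takeGroupB: decomposition of the input
theorem takeGroupB_decomp : ∀ (cs : List Char) (d : Int) (content rest : List Char),
    takeGroupB cs d [] = some (content, rest) → cs = content ++ '}' :: rest := by
  intro cs
  induction cs with
  | nil => intro d content rest h; simp [takeGroupB] at h
  | cons c cs' ih =>
    intro d content rest h
    simp only [takeGroupB] at h
    split_ifs at h with h1 h2 h3
    · rw [takeGroupB_acc] at h
      cases htg : takeGroupB cs' (d + 1) [] with
      | none => rw [htg] at h; simp at h
      | some p =>
        rw [htg] at h
        simp only [Option.map_some, Option.some.injEq, Prod.mk.injEq] at h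
        obtain ⟨h4, h5⟩ := h
        subst h1; rw [← h4, ← h5]
        simpa using ih _ _ _ htg
    · simp only [Option.some.injEq, Prod.mk.injEq] at h
      subst h2; rw [← h.1, ← h.2]; simp
    · rw [takeGroupB_acc] at h
      cases htg : takeGroupB cs' (d - 1) [] with
      | none => rw [htg] at h; simp at h
      | some p =>
        rw [htg] at h
        simp only [Option.map_some, Option.some.injEq, Prod.mk.injEq] at h
        obtain ⟨h4, h5⟩ := h
        subst h2; rw [← h4, ← h5]
        simpa using ih _ _ _ htg
    · rw [takeGroupB_acc] at h
      cases htg : takeGroupB cs' d [] with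
      | none => rw [htg] at h; simp at h
      | some p =>
        rw [htg] at h
        simp only [Option.map_some, Option.some.injEq, Prod.mk.injEq] at h
        obtain ⟨h4, h5⟩ := h
        rw [← h4, ← h5]
        simpa using ih _ _ _ htg

-- takeGroupB: brace counts of the content
theorem takeGroupB_counts : ∀ (cs : List Char) (d : Int) (content rest : List Char),
    1 ≤ d → takeGroupB cs d [] = some (content, rest) →
    (content.count '}' : Int) + 1 = content.count '{' + d := by
  intro cs
  induction cs with
  | nil => intro d content rest _ h; simp [takeGroupB] at h
  | cons c cs' ih =>
    intro d content rest hd h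
    simp only [takeGroupB] at h
    split_ifs at h with h1 h2 h3
    · rw [takeGroupB_acc] at h
      cases htg : takeGroupB cs' (d + 1) [] with
      | none => rw [htg] at h; simp at h
      | some p =>
        rw [htg] at h
        simp only [Option.map_some, Option.some.injEq, Prod.mk.injEq] at h
        have := ih _ _ _ (by omega) htg
        subst h1; rw [← h.1]
        simp only [List.nil_append, List.singleton_append, List.count_cons]
        norm_num
        omega
    · simp only [Option.some.injEq, Prod.mk.injEq] at h
      rw [← h.1]; simp; omega
    · rw [takeGroupB_acc] at h
      cases htg : takeGroupB cs' (d - 1) [] with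
      | none => rw [htg] at h; simp at h
      | some p =>
        rw [htg] at h
        simp only [Option.map_some, Option.some.injEq, Prod.mk.injEq] at h
        have := ih _ _ _ (by omega) htg
        subst h2; rw [← h.1]
        simp only [List.nil_append, List.singleton_append, List.count_cons]
        norm_num
        omega
    · rw [takeGroupB_acc] at h
      cases htg : takeGroupB cs' d [] with
      | none => rw [htg] at h; simp at h
      | some p =>
        rw [htg] at h
        simp only [Option.map_some, Option.some.injEq, Prod.mk.injEq] at h
        have := ih _ _ _ hd htg
        rw [← h.1]
        have hc1 : (c == '}') = false := by simpa using h2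
        have hc2 : (c == '{') = false := by simpa using h1
        simp only [List.nil_append, List.singleton_append, List.count_cons, hc1, hc2]
        norm_num
        omega

-- takeGroupB succeeds when enough closers remain
theorem takeGroupB_some : ∀ (cs : List Char) (d : Int) (acc : List Char),
    1 ≤ d → (cs.count '{' : Int) + d ≤ cs.count '}' →
    takeGroupB cs d acc ≠ none := by
  intro cs
  induction cs with
  | nil =>
    intro d acc hd hc
    simp only [List.count_nil] at hc
    omega
  | cons c cs' ih =>
    intro d acc hd hc
    simp only [takeGroupB]
    split_ifs with h1 h2 h3
    · apply ih _ _ (by omega)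
      subst h1
      simp only [List.count_cons] at hc
      norm_num at hc
      omega
    · simp
    · apply ih _ _ (by omega)
      subst h2
      simp only [List.count_cons] at hc
      norm_num at hc
      omega
    · apply ih _ _ hd
      simp only [List.count_cons] at hc
      have hc1 : (c == '}') = false := by simpa using h2
      have hc2 : (c == '{') = false := by simpa using h1
      simp [hc1, hc2] at hc
      omega

-- parseB returns a value on balanced input
theorem parseB_some (N : Nat) : ∀ (cs cur : List Char), cs.length ≤ N →
    (∀ k, k ≤ cs.length → ((cs.take k).count '}' : Int) ≤ (cs.take k).count '{') →
    cs.count '{' = cs.count '}' →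
    parseB cs cur ≠ none := by
  induction N with
  | zero =>
    intro cs cur hN _ _
    have : cs = [] := List.eq_nil_of_length_eq_zero (by omega)
    subst this; simp [parseB]
  | succ N ih =>
    intro cs cur hN hpre htot
    cases cs with
    | nil => simp [parseB]
    | cons c rest =>
      by_cases h1 : c = '{'
      · subst h1
        have htg : takeGroupB rest 1 [] ≠ none := by
          apply takeGroupB_some _ _ _ (by omega)
          simp at htot
          omega
        cases htg2 : takeGroupB rest 1 [] with
        | none => exact absurd htg2 htg
        | some p =>
          obtain ⟨content, rest'⟩ := p
          have hdec := takeGroupB_decomp _ _ _ _ htg2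
          have hcnt := takeGroupB_counts _ _ _ _ (by omega) htg2
          have hcnt' : content.count '{' = content.count '}' := by omega
          have hlen : rest.length = content.length + 1 + rest'.length := by
            rw [hdec]; simp only [List.length_append, List.length_cons]; omega
          have hrtot : rest'.count '{' = rest'.count '}' := by
            subst hdec
            simp [List.count_append] at htot
            omega
          have hrpre : ∀ k, k ≤ rest'.length →
              ((rest'.take k).count '}' : Int) ≤ (rest'.take k).count '{' := by
            intro k hk
            have := hpre ((content.length + 1 + k) + 1) (by simp; omega)
            rw [hdec] at this
            have heq : ('{' :: (content ++ '}' :: rest')).take ((content.length + 1 + k) + 1)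
                = '{' :: (content ++ '}' :: rest'.take k) := by
              simp only [List.take_succ_cons]
              congr 1
              have : content.length + 1 + k = (content ++ ['}']).length + k := by simp
              rw [this]
              have : content ++ '}' :: rest' = (content ++ ['}']) ++ rest' := by simp
              rw [this, List.take_length_add_append]
              simp
            rw [heq] at this
            simp [List.count_append] at this
            omega
          have hrec : parseB rest' [] ≠ none := by
            have hN' : rest'.length ≤ N := by
              simp only [List.length_cons] at hN
              omega
            exact ih _ [] hN' hrpre hrtot
          simp only [parseB, if_true]
          split
          · next heq => exact absurd heq htg
          · rename_i c2 r2 heq2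
            rw [htg2] at heq2
            injection heq2 with heq1
            injection heq1 with heqc heqr
            subst heqc; subst heqr
            cases hp : parseB rest' [] with
            | none => exact absurd hp hrec
            | some q => simp
      · by_cases h2 : c = '}'
        · exfalso
          have := hpre 1 (by simp)
          subst h2
          simp at this
        · simp only [parseB, if_neg h1, if_neg h2]
          apply ih _ _ (by simp at hN ⊢; omega)
          · intro k hk
            have := hpre (k + 1) (by simp; omega)
            simp only [List.take_succ_cons, List.count_cons] at this
            have hc1 : (c == '}') = false := by simpa using h2
            have hc2 : (c == '{') = false := by simpa using h1
            simp [hc1, hc2] at this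
            simpa using this
          · simp only [List.count_cons] at htot
            have hc1 : (c == '}') = false := by simpa using h2
            have hc2 : (c == '{') = false := by simpa using h1
            simp [hc1, hc2] at htot
            exact htot

-- A's enumerate fold across one (possibly nested) group body
theorem foldA_group : ∀ (cs : List Char) (d : Int) (content rest : List Char),
    1 ≤ d → takeGroupB cs d [] = some (content, rest) →
    ∀ (g0 : List (Int × Int)) (gs n : Int),
    (PySem.List.enumerate cs n).foldl stepA (some (g0, d, gs)) =
      (PySem.List.enumerate rest (n + content.length + 1)).foldl stepA
        (some (g0 ++ [(gs, n + content.length)], 0, gs)) := by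
  intro cs
  induction cs with
  | nil => intro d content rest hd h; simp [takeGroupB] at h
  | cons c cs' ih =>
    intro d content rest hd h g0 gs n
    simp only [takeGroupB] at h
    split_ifs at h with h1 h2 h3
    · -- c = '{'
      rw [takeGroupB_acc] at h
      cases htg : takeGroupB cs' (d + 1) [] with
      | none => rw [htg] at h; simp at h
      | some p =>
        rw [htg] at h
        simp only [Option.map_some, Option.some.injEq, Prod.mk.injEq] at h
        obtain ⟨hc, hr⟩ := h
        subst h1
        rw [PySem.List.enumerate_cons, List.foldl_cons]
        have hstep : stepA (some (g0, d, gs)) (n, '{') = some (g0, d + 1, gs) := by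
          have : ¬ (d + 1 = 1) := by omega
          simp [stepA, this]
        rw [hstep, ih _ _ _ (by omega) htg]
        rw [← hc, ← hr]
        have e1 : n + 1 + (p.1.length : Int) + 1 = n + (([] ++ ['{'] ++ p.1).length : Int) + 1 := by
          simp; ring
        have e2 : n + 1 + (p.1.length : Int) = n + (([] ++ ['{'] ++ p.1).length : Int) := by
          simp; ring
        rw [e1, e2]
    · -- c = '}', depth hits 0
      simp only [Option.some.injEq, Prod.mk.injEq] at h
      obtain ⟨hc, hr⟩ := h
      subst h2
      rw [PySem.List.enumerate_cons, List.foldl_cons]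
      have hd1 : d = 1 := by omega
      subst hd1
      have hstep : stepA (some (g0, 1, gs)) (n, '}') = some (g0 ++ [(gs, n)], 0, gs) := by
        simp [stepA]
      rw [hstep, ← hc, ← hr]
      norm_num
    · -- c = '}', depth stays ≥ 1
      rw [takeGroupB_acc] at h
      cases htg : takeGroupB cs' (d - 1) [] with
      | none => rw [htg] at h; simp at h
      | some p =>
        rw [htg] at h
        simp only [Option.map_some, Option.some.injEq, Prod.mk.injEq] at h
        obtain ⟨hc, hr⟩ := h
        subst h2
        rw [PySem.List.enumerate_cons, List.foldl_cons]
        have hstep : stepA (some (g0, d, gs)) (n, '}') = some (g0, d - 1, gs) := by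
          have e0 : ¬ (d - 1 = 0) := by omega
          have e3 : ¬ (d - 1 < 0) := by omega
          simp [stepA, e0, e3]
        rw [hstep, ih _ _ _ (by omega) htg]
        rw [← hc, ← hr]
        have e1 : n + 1 + (p.1.length : Int) + 1 = n + (([] ++ ['}'] ++ p.1).length : Int) + 1 := by
          simp; ring
        have e2 : n + 1 + (p.1.length : Int) = n + (([] ++ ['}'] ++ p.1).length : Int) := by
          simp; ring
        rw [e1, e2]
    · -- ordinary character
      rw [takeGroupB_acc] at h
      cases htg : takeGroupB cs' d [] with
      | none => rw [htg] at h; simp at h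
      | some p =>
        rw [htg] at h
        simp only [Option.map_some, Option.some.injEq, Prod.mk.injEq] at h
        obtain ⟨hc, hr⟩ := h
        rw [PySem.List.enumerate_cons, List.foldl_cons]
        have hstep : stepA (some (g0, d, gs)) (n, c) = some (g0, d, gs) := by
          simp [stepA, h1, h2]
        rw [hstep, ih _ _ _ hd htg]
        rw [← hc, ← hr]
        have e1 : n + 1 + (p.1.length : Int) + 1 = n + (([] ++ [c] ++ p.1).length : Int) + 1 := by
          simp; ring
        have e2 : n + 1 + (p.1.length : Int) = n + (([] ++ [c] ++ p.1).length : Int) := by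
          simp; ring
        rw [e1, e2]

-- slicing a concrete decomposition
theorem slice_mid (a b c : List Char) :
    PySem.List.slice (a ++ b ++ c) (some (a.length : Int)) (some ((a.length + b.length : Nat) : Int)) = b := by
  rw [PySem.List.slice_natCast]
  have h1 : (a ++ b ++ c).drop a.length = b ++ c := by
    rw [List.append_assoc, List.drop_left]
  rw [h1, Nat.add_sub_cancel_left, List.take_left]

theorem slice_suffix (a b : List Char) :
    PySem.List.slice (a ++ b) (some (a.length : Int)) none = b := by
  rw [PySem.List.slice_from_natCast, List.drop_left]

-- main correspondence, base case: no characters left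
theorem mainB_nil (t pre cur : List Char) (ht : t = pre ++ cur)
    (g0 : List (Int × Int)) (gs : Int) :
    ∃ (gl : List (Int × Int)) (gs' : Int),
      (PySem.List.enumerate ([] : List Char) ((pre.length + cur.length : Nat) : Int)).foldl stepA (some (g0, 0, gs)) = some (g0 ++ gl, 0, gs') ∧
      ∀ R : List (List Char), ∃ (R2 : List (List Char)) (pos2 : Int),
        gl.foldl (stepA2 t) (some (R, ((pre.length : Nat) : Int))) = some (R2, pos2) ∧
        (if pos2 < (t.length : Int) then R2.map (· ++ restoreA (PySem.List.slice t (some pos2) none)) else R2)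
          = R.flatMap (fun r => (combosB []).map (fun ts => r ++ joinB [restoreA cur] ts)) := by
  refine ⟨[], gs, by simp, ?_⟩
  intro R
  refine ⟨R, ((pre.length : Nat) : Int), by simp, ?_⟩
  subst ht
  by_cases hcur : cur = []
  · subst hcur
    simp [combosB, joinB, restoreA_nil]
  · have hlt : ((pre.length : Nat) : Int) < ((pre ++ cur).length : Int) := by
      simp only [List.length_append]
      have : 0 < cur.length := List.length_pos_iff.mpr hcur
      push_cast
      omega
    rw [if_pos hlt, slice_suffix]
    simp only [combosB, joinB, List.map_cons, List.map_nil]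
    rw [← List.map_eq_flatMap]

-- unfolding parseB at an opening brace
theorem parseB_brace (rest cur : List Char) :
    parseB ('{' :: rest) cur = (match takeGroupB rest 1 [] with
      | none => none
      | some (content, rest') =>
        match parseB rest' [] with
        | none => none
        | some (lits, grps) => some (restoreA cur :: lits,
            ((PySem.Chars.splitOn content [',']).map
              (fun o => restoreA (PySem.Chars.strip o))) :: grps)) := by
  rw [parseB]
  rw [if_pos rfl]
  cases takeGroupB rest 1 [] with
  | none => rfl
  | some p => cases p; rfl

-- main correspondence between A's two phases and B's parse
theorem mainB (t : List Char) (N : Nat) : ∀ (cs pre cur : List Char)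
    (lits : List (List Char)) (grps : List (List (List Char))),
    cs.length ≤ N →
    t = pre ++ cur ++ cs →
    parseB cs cur = some (lits, grps) →
    ∀ (g0 : List (Int × Int)) (gs : Int),
    ∃ (gl : List (Int × Int)) (gs' : Int),
      (PySem.List.enumerate cs ((pre.length + cur.length : Nat) : Int)).foldl stepA (some (g0, 0, gs)) = some (g0 ++ gl, 0, gs') ∧
      ∀ R : List (List Char), ∃ (R2 : List (List Char)) (pos2 : Int),
        gl.foldl (stepA2 t) (some (R, ((pre.length : Nat) : Int))) = some (R2, pos2) ∧
        (if pos2 < (t.length : Int) then R2.map (· ++ restoreA (PySem.List.slice t (some pos2) none)) else R2)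
          = R.flatMap (fun r => (combosB grps).map (fun ts => r ++ joinB lits ts)) := by
  induction N with
  | zero =>
    intro cs pre cur lits grps hN ht hp g0 gs
    have hnil : cs = [] := List.eq_nil_of_length_eq_zero (by omega)
    subst hnil
    simp only [parseB, Option.some.injEq, Prod.mk.injEq] at hp
    obtain ⟨h1, h2⟩ := hp
    subst h2; rw [← h1]
    exact mainB_nil t pre cur (by simpa using ht) g0 gs
  | succ N ih =>
    intro cs pre cur lits grps hN ht hp g0 gs
    cases cs with
    | nil =>
      simp only [parseB, Option.some.injEq, Prod.mk.injEq] at hp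
      obtain ⟨h1, h2⟩ := hp
      subst h2; rw [← h1]
      exact mainB_nil t pre cur (by simpa using ht) g0 gs
    | cons c rest =>
      by_cases hc1 : c = '{'
      · subst hc1
        rw [parseB_brace] at hp
        cases htg : takeGroupB rest 1 [] with
        | none => rw [htg] at hp; simp at hp
        | some p =>
          obtain ⟨content, rest'⟩ := p
          rw [htg] at hp
          simp only at hp
          cases hpb : parseB rest' [] with
          | none => rw [hpb] at hp; simp at hp
          | some q =>
            obtain ⟨lits', grps'⟩ := q
            rw [hpb] at hp
            simp only at hp
            simp only [Option.some.injEq, Prod.mk.injEq] at hp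
            obtain ⟨hlits, hgrps⟩ := hp
            have hdec := takeGroupB_decomp _ _ _ _ htg
            -- decomposition of t
            have ht2 : t = (pre ++ cur ++ ['{']) ++ content ++ ('}' :: rest') := by
              rw [ht, hdec]; simp [List.append_assoc]
            -- IH on the remainder
            have ht' : t = (pre ++ cur ++ '{' :: content ++ ['}']) ++ [] ++ rest' := by
              simp [ht, hdec]
            have hlen : rest.length = content.length + 1 + rest'.length := by
              rw [hdec]; simp only [List.length_append, List.length_cons]; omega
            obtain ⟨gl', gs'', hfold', hph2'⟩ :=
              ih rest' (pre ++ cur ++ '{' :: content ++ ['}']) [] lits' grps'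
                (by simp only [List.length_cons] at hN; omega) ht' hpb
                (g0 ++ [(((pre.length + cur.length : Nat) : Int),
                  ((pre.length + cur.length : Nat) : Int) + 1 + content.length)])
                (((pre.length + cur.length : Nat) : Int))
            -- abbreviations
            set n : Int := ((pre.length + cur.length : Nat) : Int) with hn
            refine ⟨(n, n + 1 + content.length) :: gl', gs'', ?_, ?_⟩
            · rw [PySem.List.enumerate_cons, List.foldl_cons]
              have hstep : stepA (some (g0, 0, gs)) (n, '{') = some (g0, 1, n) := by
                simp [stepA]
              rw [hstep, hdec]
              have hfa := foldA_group (content ++ '}' :: rest') 1 content rest' (by omega)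
                (by rw [← hdec]; exact htg) g0 n (n + 1)
              rw [hfa]
              have hidx2 : (((pre ++ cur ++ '{' :: content ++ ['}']).length + ([] : List Char).length : Nat) : Int)
                  = n + 1 + (content.length : Int) + 1 := by
                rw [hn]; simp only [List.length_append, List.length_cons, List.length_nil]
                push_cast; ring
              rw [hidx2] at hfold'
              rw [hfold']
              simp [List.append_assoc]
            · intro R
              -- the step for this group in A's second phase
              have hsl1 : PySem.List.slice t (some ((pre.length : Nat) : Int)) (some n) = cur := by
                rw [hn, ht]; exact slice_mid pre cur ('{' :: rest)
              have he1 : n + 1 = (((pre ++ cur ++ ['{']).length : Nat) : Int) := by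
                rw [hn]; simp only [List.length_append, List.length_cons, List.length_nil]
                push_cast; ring
              have he2 : n + 1 + (content.length : Int)
                  = (((pre ++ cur ++ ['{']).length + content.length : Nat) : Int) := by
                rw [hn]; simp only [List.length_append, List.length_cons, List.length_nil]
                push_cast; ring
              have hsl2 : PySem.List.slice t (some (n + 1)) (some (n + 1 + (content.length : Int))) = content := by
                rw [he2, he1, ht2]; exact slice_mid (pre ++ cur ++ ['{']) content ('}' :: rest')
              have hstep2 : stepA2 t (some (R, ((pre.length : Nat) : Int))) (n, n + 1 + (content.length : Int))
                  = some ((R.map (· ++ restoreA cur)).flatMap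
                      (fun r => (optionsA content).map (fun o => r ++ restoreA o)),
                    n + 1 + (content.length : Int) + 1) := by
                simp only [stepA2, hsl1, hsl2]
                rw [if_neg (optionsA_ne_nil content)]
              rw [List.foldl_cons, hstep2]
              have hidx3 : n + 1 + (content.length : Int) + 1
                  = (((pre ++ cur ++ '{' :: content ++ ['}']).length : Nat) : Int) := by
                rw [hn]; simp only [List.length_append, List.length_cons, List.length_nil]
                push_cast; ring
              obtain ⟨R2, pos2, hf, hfin⟩ := hph2' ((R.map (· ++ restoreA cur)).flatMap
                (fun r => (optionsA content).map (fun o => r ++ restoreA o)))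
              refine ⟨R2, pos2, ?_, ?_⟩
              · rw [hidx3]; exact hf
              · rw [hfin, ← hlits, ← hgrps]
                have hopt : ((PySem.Chars.splitOn content [',']).map
                    (fun o => restoreA (PySem.Chars.strip o))) = (optionsA content).map restoreA := by
                  rw [optionsA_eq, List.map_map]; rfl
                rw [hopt]
                simp only [combosB, joinB, List.flatMap_map, List.map_flatMap,
                  List.flatMap_assoc, List.map_map, Function.comp_def, List.append_assoc]
      · by_cases hc2 : c = '}'
        · subst hc2; simp [parseB, hc1] at hp
        · -- ordinary character
          have hp' : parseB rest (cur ++ [c]) = some (lits, grps) := by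
            simpa [parseB, hc1, hc2] using hp
          have ht' : t = pre ++ (cur ++ [c]) ++ rest := by simp [ht]
          have hidx : ((pre.length + (cur ++ [c]).length : Nat) : Int)
              = ((pre.length + cur.length : Nat) : Int) + 1 := by
            simp; ring
          obtain ⟨gl, gs', hfold, hph2⟩ :=
            ih rest pre (cur ++ [c]) lits grps (by simp at hN ⊢; omega) ht' hp' g0 gs
          refine ⟨gl, gs', ?_, ?_⟩
          · rw [PySem.List.enumerate_cons, List.foldl_cons]
            have hstep : stepA (some (g0, 0, gs)) (((pre.length + cur.length : Nat) : Int), c)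
                = some (g0, 0, gs) := by
              simp [stepA, hc1, hc2]
            rw [hstep, ← hidx]
            exact hfold
          · exact hph2

-- final assembly
theorem expand_equal (prompt : String)
    (hpre1 : ∀ k, k ≤ (substA prompt.toList).length →
      ((substA prompt.toList).take k).count '}' ≤ ((substA prompt.toList).take k).count '{')
    (hpre2 : (substA prompt.toList).count '{' = (substA prompt.toList).count '}') :
    expand_permutations prompt = expand_permutations_alt prompt := by
  set t : List Char := substA prompt.toList with htdef
  have hps : parseB t [] ≠ none := by
    apply parseB_some t.length t [] le_rfl
    · intro k hk; exact_mod_cast hpre1 k hk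
    · exact hpre2
  cases hpb : parseB t [] with
  | none => exact absurd hpb hps
  | some q =>
    obtain ⟨lits, grps⟩ := q
    obtain ⟨gl, gs', hfold, hph2⟩ :=
      mainB t t.length t [] [] lits grps le_rfl (by simp) hpb [] (-1)
    have hfold0 : List.foldl stepA (some ([], 0, -1)) (PySem.List.enumerate t 0) = some (gl, 0, gs') := by
      simp at hfold
      exact hfold
    obtain ⟨R2, pos2, hf, hfin⟩ := hph2 [[]]
    have hf0 : List.foldl (stepA2 t) (some ([[]], 0)) gl = some (R2, pos2) := by
      simpa using hf
    have hfin0 : (if pos2 < (t.length : Int) then R2.map (· ++ restoreA (PySem.List.slice t (some pos2) none)) else R2)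
        = (combosB grps).map (fun ts => joinB lits ts) := by
      rw [hfin]
      simp
    have hB : expand_permutations_alt prompt
        = ((combosB grps).map (fun ts => joinB lits ts)).map String.ofList := by
      simp only [expand_permutations_alt, ← htdef, hpb, List.map_map, Function.comp_def]
    by_cases hgl : gl = []
    · subst hgl
      -- A takes the no-groups early return
      have hA : expand_permutations prompt = [String.ofList (restoreA t)] := by
        simp only [expand_permutations, ← htdef, hfold0]
        simp
      rw [hA, hB]
      -- identify R2, pos2
      simp only [List.foldl_nil, Option.some.injEq, Prod.mk.injEq] at hf0
      obtain ⟨hR2, hpos2⟩ := hf0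
      subst hR2
      rw [← hpos2] at hfin0
      by_cases ht0 : t = []
      · rw [if_neg (by simp [ht0])] at hfin0
        rw [← hfin0, ht0, restoreA_nil]
        simp
      · have : (0 : Int) < (t.length : Int) := by
          have : 0 < t.length := List.length_pos_iff.mpr ht0
          exact_mod_cast this
        rw [if_pos this] at hfin0
        have hslt : PySem.List.slice t (some (0 : Int)) none = t := by
          rw [show (0 : Int) = ((0 : Nat) : Int) from rfl, PySem.List.slice_from_natCast, List.drop_zero]
        rw [hslt] at hfin0
        rw [← hfin0]
        simp
    · -- A runs its second phase
      have hA : expand_permutations prompt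
          = (if pos2 < (t.length : Int) then R2.map (· ++ restoreA (PySem.List.slice t (some pos2) none)) else R2).map String.ofList := by
        simp only [expand_permutations, ← htdef, hfold0]
        simp only [lt_irrefl, if_false, if_neg hgl, hf0]
      rw [hA, hB, hfin0]

-- ===== VERDICT (by name: the statement is the Claim_ definition above) =====
theorem expand_permutations_spec : Claim_equal_expand_permutations := by
  intro prompt _ hpre
  obtain ⟨h1, h2⟩ := hpre
  show expand_permutations prompt = expand_permutations_alt prompt
  exact expand_equal prompt h1 h2
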